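-- pv_equiv track=rewrite | github.com/yeojingi/genome-sequencing | week1/reserved_4UniversalString.py | overlap_graph
-- ===== SOURCE A (Python) =====
-- def overlap_graph(patterns):
--   edges = [ [] for _ in range(len(patterns))]
--
--   for i in range(len(patterns)):
--     tail = patterns[i][1:]
--     for j in range(len(patterns)):
--       head = patterns[j][:-1]
--
--       if tail == head:
--         edges[i].append(j)
--
--   return edges
-- ===== SOURCE B (Python) =====
-- def overlap_graph(patterns):
--   # Hash all prefixes once, then one lookup per tail: O(n*k) instead of A's O(n^2*k).
--   index = {}
--   for j, p in enumerate(patterns):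
--     index.setdefault(p[:-1], []).append(j)
--   return [list(index.get(p[1:], [])) for p in patterns]
-- ===== Notes on version B (the rewrite author's own statement) =====
-- stated objective: faster
-- what changed: replaces the nested all-pairs suffix/prefix comparison by a single pass that hashes every prefix into a dict of index lists and then answers each row with one dict lookup of the tail
import Mathlib
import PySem

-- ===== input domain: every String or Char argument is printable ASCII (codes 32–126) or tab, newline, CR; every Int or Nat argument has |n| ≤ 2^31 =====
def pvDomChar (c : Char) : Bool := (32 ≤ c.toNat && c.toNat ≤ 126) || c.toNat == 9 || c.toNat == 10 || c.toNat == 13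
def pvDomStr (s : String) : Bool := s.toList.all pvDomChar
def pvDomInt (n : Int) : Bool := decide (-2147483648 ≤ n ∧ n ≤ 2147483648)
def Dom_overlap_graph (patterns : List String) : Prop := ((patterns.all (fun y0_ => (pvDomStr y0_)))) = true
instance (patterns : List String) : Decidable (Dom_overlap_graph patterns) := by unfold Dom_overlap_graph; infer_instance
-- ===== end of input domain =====

-- B replaces A's all-pairs nested comparison by hashing every prefix into a dict once and
-- answering each row with a single lookup of the tail (objective: faster).

-- ===== PORT A =====
def overlap_graph (patterns : List String) : List (List Int) :=
  let n : Int := PySem.List.len patterns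
  let edges : List (List Int) := (PySem.List.pyRange 0 n).map (fun _ => ([] : List Int))
  (PySem.List.pyRange 0 n).foldl (fun edges i =>
    let tail := PySem.Str.slice (PySem.List.pyGetD patterns i "") (some 1) none
    (PySem.List.pyRange 0 n).foldl (fun edges j =>
      let head := PySem.Str.slice (PySem.List.pyGetD patterns j "") none (some (-1))
      if tail == head then
        PySem.List.pySetD edges i (PySem.List.pyGetD edges i [] ++ [j])
      else edges) edges) edges

-- ===== PORT B =====
def overlap_graph_alt (patterns : List String) : List (List Int) :=
  let index : PySem.Dict String (List Int) :=
    (PySem.List.enumerate patterns).foldl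
      (fun d jp => d.modify (PySem.Str.slice jp.2 none (some (-1))) [] (fun l => l ++ [jp.1]))
      PySem.Dict.empty
  patterns.map (fun p => index.getD (PySem.Str.slice p (some 1) none) [])

-- ===== PRECONDITION & SPEC =====
def Spec_overlap_graph (patterns : List String) (out : List (List Int)) : Prop := out = overlap_graph_alt patterns
instance (patterns : List String) (out : List (List Int)) : Decidable (Spec_overlap_graph patterns out) := by unfold Spec_overlap_graph; infer_instance

-- ===== CLAIM (what is proved, stated in full; the proofs are below) =====
def Claim_equal_overlap_graph : Prop := ∀ (patterns : List String), Dom_overlap_graph patterns → Spec_overlap_graph patterns (overlap_graph patterns)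

-- ===== LEMMAS AND PROOFS =====

-- the row both programs produce for a pattern p: matching indices j in increasing order
def pvRow (patterns : List String) (p : String) : List Int :=
  ((List.range patterns.length).filter
    (fun j => PySem.Str.slice p (some 1) none
      == PySem.Str.slice (patterns.getD j "") none (some (-1)))).map (fun (j : Nat) => ((j : Nat) : Int))

theorem pv_beq_comm (a b : String) : (a == b) = (b == a) := by
  by_cases h : a = b
  · simp [h]
  · simp [h, Ne.symm h]

-- inner loop of A: appending all matching j to slot i is a single set at i
theorem pv_inner (P : Int → Bool) (l : List Int) (edges : List (List Int)) (i : Nat)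
    (hi : i < edges.length) :
    l.foldl (fun e j => if P j then
        PySem.List.pySetD e (i : Int) (PySem.List.pyGetD e (i : Int) [] ++ [j]) else e) edges
      = edges.set i (edges.getD i [] ++ l.filter P) := by
  induction l generalizing edges with
  | nil =>
    simp only [List.foldl_nil, List.filter_nil, List.append_nil]
    rw [List.getD_eq_getElem _ _ hi]
    exact (List.set_getElem_self hi).symm
  | cons j l ih =>
    simp only [List.foldl_cons, List.filter_cons]
    by_cases hP : P j
    · simp only [hP, if_true]
      rw [PySem.List.pyGetD_natCast, PySem.List.pySetD_natCast,
        ih _ (by simpa using hi)]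
      have hset : ((edges.set i (edges.getD i [] ++ [j])).getD i []) = edges.getD i [] ++ [j] := by
        rw [List.getD_eq_getElem _ _ (by simpa using hi)]
        exact List.getElem_set_self _
      rw [hset, List.set_set]
      simp
    · simp only [hP, Bool.false_eq_true, if_false]
      exact ih edges hi

-- dict built by setdefault-append: lookup is the filtered index list
theorem pv_dict (l : List (Int × String)) (d : PySem.Dict String (List Int)) (k : String) :
    ((l.foldl (fun d jp =>
        d.modify (PySem.Str.slice jp.2 none (some (-1))) [] (fun acc => acc ++ [jp.1])) d).getD k [])
      = d.getD k []
        ++ (l.filter (fun jp => PySem.Str.slice jp.2 none (some (-1)) == k)).map Prod.fst := by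
  induction l generalizing d with
  | nil => simp
  | cons jp l ih =>
    simp only [List.foldl_cons, List.filter_cons]
    rw [ih]
    by_cases h : PySem.Str.slice jp.2 none (some (-1)) = k
    · simp [h]
    · simp [PySem.Dict.getD_modify, h, Ne.symm h]

-- B's row for a pattern p, in closed form
theorem pv_rowB_aux (patterns : List String) (p : String) (l : List Nat) :
    ((l.map (fun k => (((k : Nat) : Int), patterns.getD k ""))).filter
        (fun jp => PySem.Str.slice jp.2 none (some (-1)) == PySem.Str.slice p (some 1) none)).map
        Prod.fst
      = (l.filter (fun j => PySem.Str.slice p (some 1) none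
          == PySem.Str.slice (patterns.getD j "") none (some (-1)))).map (fun j => ((j : Nat) : Int)) := by
  induction l with
  | nil => simp
  | cons k l ih =>
    simp only [List.map_cons, List.filter_cons]
    rw [pv_beq_comm (PySem.Str.slice (patterns.getD k "") none (some (-1)))
      (PySem.Str.slice p (some 1) none)]
    by_cases h : PySem.Str.slice p (some 1) none
        == PySem.Str.slice (patterns.getD k "") none (some (-1))
    · simp only [h, if_true, List.map_cons]
      rw [ih]
    · simp only [h, Bool.false_eq_true, if_false]
      exact ih

theorem pv_rowB (patterns : List String) (p : String) :
    ((PySem.List.enumerate patterns).filter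
        (fun jp => PySem.Str.slice jp.2 none (some (-1)) == PySem.Str.slice p (some 1) none)).map
        Prod.fst
      = pvRow patterns p := by
  rw [PySem.List.enumerate_eq_map_pyRange patterns "", PySem.List.len_eq,
    PySem.List.pyRange_zero_natCast, List.map_map]
  simp only [Function.comp_def, PySem.List.pyGetD_natCast]
  rw [pvRow]
  exact pv_rowB_aux patterns p (List.range patterns.length)

-- A's inner filter over the Int range, in closed form
theorem pv_rowA (patterns : List String) (p : String) (l : List Nat) :
    (l.map (fun j => ((j : Nat) : Int))).filter
        (fun j => PySem.Str.slice p (some 1) none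
          == PySem.Str.slice (PySem.List.pyGetD patterns j "") none (some (-1)))
      = (l.filter (fun j => PySem.Str.slice p (some 1) none
          == PySem.Str.slice (patterns.getD j "") none (some (-1)))).map (fun j => ((j : Nat) : Int)) := by
  induction l with
  | nil => simp
  | cons k l ih =>
    simp only [List.map_cons, List.filter_cons]
    rw [PySem.List.pyGetD_natCast patterns k ""]
    by_cases h : PySem.Str.slice p (some 1) none
        == PySem.Str.slice (patterns.getD k "") none (some (-1))
    · simp only [h, if_true, List.map_cons]
      rw [ih]
    · simp only [h, Bool.false_eq_true, if_false]
      exact ih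

-- outer loop of A over the first k indices
theorem pv_outer (patterns : List String) (k : Nat) (hk : k ≤ patterns.length) :
    (((List.range k).map (fun (i : Nat) => ((i : Nat) : Int))).foldl (fun edges i =>
        (((List.range patterns.length).map (fun (k : Nat) => ((k : Nat) : Int))).foldl (fun edges j =>
          if PySem.Str.slice (PySem.List.pyGetD patterns i "") (some 1) none
              == PySem.Str.slice (PySem.List.pyGetD patterns j "") none (some (-1)) then
            PySem.List.pySetD edges i (PySem.List.pyGetD edges i [] ++ [j])
          else edges) edges))
        (((List.range patterns.length).map (fun (k : Nat) => ((k : Nat) : Int))).map (fun _ => ([] : List Int))))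
      = (List.range patterns.length).map (fun i =>
          if i < k then pvRow patterns (patterns.getD i "") else []) := by
  induction k with
  | zero =>
    simp only [List.range_zero, List.map_nil, List.foldl_nil, Nat.not_lt_zero, if_false,
      List.map_map]
    simp [Function.comp_def]
  | succ k ih =>
    rw [List.range_succ, List.map_append, List.foldl_append, ih (Nat.le_of_succ_le hk)]
    simp only [List.map_cons, List.map_nil, List.foldl_cons, List.foldl_nil]
    have hklen : k < ((List.range patterns.length).map (fun i =>
        if i < k then pvRow patterns (patterns.getD i "") else [])).length := by
      simpa using hk
    rw [PySem.List.pyGetD_natCast patterns k ""]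
    rw [pv_inner _ _ _ k hklen]
    have hgetD : ((List.range patterns.length).map (fun i =>
        if i < k then pvRow patterns (patterns.getD i "") else [])).getD k [] = [] := by
      rw [List.getD_eq_getElem _ _ hklen]
      simp
    rw [hgetD, List.nil_append, pv_rowA, ← pvRow]
    apply List.ext_getElem
    · simp
    · intro m h1 h2
      simp only [List.getElem_set, List.getElem_map, List.getElem_range]
      by_cases hmk : m = k
      · subst hmk; simp
      · rcases Nat.lt_or_ge m k with h | h
        · simp [h, Nat.lt_succ_of_lt h]
          exact fun h' => absurd h'.symm hmk
        · have h1' : ¬ m < k := Nat.not_lt.mpr h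
          have h2' : ¬ m < k + 1 := by omega
          simp [h1', h2']
          exact fun h' => absurd h'.symm hmk

-- ===== VERDICT (by name: the statement is the Claim_ definition above) =====
theorem overlap_graph_spec : Claim_equal_overlap_graph := by
  intro patterns _
  unfold Spec_overlap_graph overlap_graph overlap_graph_alt
  dsimp only
  rw [PySem.List.len_eq, PySem.List.pyRange_zero_natCast,
    pv_outer patterns patterns.length (le_refl _)]
  apply List.ext_getElem
  · simp
  · intro m h1 h2
    have hm : m < patterns.length := by simpa using h1
    simp only [List.getElem_map, List.getElem_range]
    rw [pv_dict _ PySem.Dict.empty _, PySem.Dict.getD_empty, List.nil_append, pv_rowB]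
    have : patterns[m] = patterns.getD m "" := by
      rw [List.getD_eq_getElem _ _ hm]
    rw [this]
    simp [hm]
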